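-- pv_equiv track=rewrite | github.com/CMU15-112/lecture_demos_qatar | week11/lec1_examples.py | func5
-- ===== SOURCE A (Python) =====
-- def func5(lst):
--     n = len(lst) # O(1)
--     result = None # O(1)
--     for i in range(len(lst)): # Runs N times
--         num = n # O(1)
--         while num > 0: # Runs log N times
--             if lst[i] == num: # O(1)
--                 result = lst[i] # O(1)
--             num = num // 2 # O(1)
--     return result # O(1)
-- ===== SOURCE B (Python) =====
-- def func5(lst):
--     n = len(lst)
--     s = set()
--     while n > 0:
--         s.add(n)
--         n //= 2
--     for x in reversed(lst):
--         if x in s: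
--             return x
--     return None
-- ===== Notes on version B (the rewrite author's own statement) =====
-- stated objective: faster
-- what changed: B precomputes the set of positive halvings of len(lst) once (O(log n) while-loop), then scans the list backwards and returns the first member of that set, replacing A's per-element inner halving loop and keep-last accumulator.
import Mathlib
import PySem

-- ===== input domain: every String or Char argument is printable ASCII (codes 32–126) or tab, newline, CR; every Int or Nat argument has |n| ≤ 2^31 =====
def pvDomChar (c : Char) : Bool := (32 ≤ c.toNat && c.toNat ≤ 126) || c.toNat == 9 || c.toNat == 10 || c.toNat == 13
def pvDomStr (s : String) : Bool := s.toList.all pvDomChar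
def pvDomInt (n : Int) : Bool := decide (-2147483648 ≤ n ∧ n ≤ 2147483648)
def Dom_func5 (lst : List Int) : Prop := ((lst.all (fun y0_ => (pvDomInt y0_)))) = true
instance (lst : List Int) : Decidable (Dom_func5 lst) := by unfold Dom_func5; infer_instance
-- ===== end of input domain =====

-- B replaces A's forward scan with a per-element inner halving loop by a precomputed
-- halvings set plus a backward scan with early exit (alternative decomposition, O(n) vs O(n log n)).

-- ===== PORT A =====
-- the 'while num > 0: if lst[i] == num: result = lst[i]; num = num // 2' loop
def func5Inner (x : Int) : Nat → Option Int → Option Int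
  | 0, result => result
  | num+1, result =>
      func5Inner x ((num+1)/2) (if x = ((num+1 : Nat) : Int) then some x else result)
  decreasing_by exact Nat.div_lt_self (Nat.succ_pos _) (by omega)

def func5 (lst : List Int) : Option Int :=
  (List.range lst.length).foldl
    (fun result i => func5Inner (lst.getD i 0) lst.length result) none

-- ===== PORT B =====
-- 'while n > 0: s.add(n); n //= 2'
def func5Halvings : Nat → PySem.Set Int → PySem.Set Int
  | 0, s => s
  | n+1, s => func5Halvings ((n+1)/2) (PySem.Set.add s ((n+1 : Nat) : Int))
  decreasing_by exact Nat.div_lt_self (Nat.succ_pos _) (by omega)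

def func5_alt (lst : List Int) : Option Int :=
  let s := func5Halvings lst.length PySem.Set.empty
  lst.reverse.find? (fun x => PySem.Set.contains s x)

-- ===== PRECONDITION & SPEC =====
def Spec_func5 (lst : List Int) (out : Option Int) : Prop := out = func5_alt lst
instance (lst : List Int) (out : Option Int) : Decidable (Spec_func5 lst out) := by unfold Spec_func5; infer_instance

-- ===== CLAIM (what is proved, stated in full; the proofs are below) =====
def Claim_equal_func5 : Prop := ∀ (lst : List Int), Dom_func5 lst → Spec_func5 lst (func5 lst)

-- ===== LEMMAS AND PROOFS =====

-- the halving chain n, n//2, …, 1 as a list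
def halveChain : Nat → List Int
  | 0 => []
  | n+1 => ((n+1 : Nat) : Int) :: halveChain ((n+1)/2)
  decreasing_by exact Nat.div_lt_self (Nat.succ_pos _) (by omega)

theorem func5Inner_eq (x : Int) (num : Nat) (r : Option Int) :
    func5Inner x num r = if x ∈ halveChain num then some x else r := by
  induction num using Nat.strong_induction_on generalizing r with
  | _ num ih =>
    match num with
    | 0 => simp [func5Inner, halveChain]
    | n+1 =>
      rw [func5Inner, halveChain, ih ((n+1)/2) (Nat.div_lt_self (Nat.succ_pos _) (by omega))]
      by_cases hx : x = ((n+1 : Nat) : Int)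
      · simp only [hx, List.mem_cons, true_or, if_pos]
        split_ifs <;> rfl
      · push_cast at hx
        simp [hx]

theorem mem_func5Halvings (y : Int) (n : Nat) (s : PySem.Set Int) :
    y ∈ func5Halvings n s ↔ y ∈ s ∨ y ∈ halveChain n := by
  induction n using Nat.strong_induction_on generalizing s with
  | _ n ih =>
    match n with
    | 0 => simp [func5Halvings, halveChain]
    | m+1 =>
      rw [func5Halvings, halveChain, ih ((m+1)/2) (Nat.div_lt_self (Nat.succ_pos _) (by omega))]
      rw [PySem.Set.mem_add]
      simp only [List.mem_cons]
      tauto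

theorem foldl_keepLast_eq_find?_reverse (l : List Int) (s : PySem.Set Int) (r : Option Int) :
    l.foldl (fun r x => if s.contains x then some x else r) r =
      ((l.reverse.find? (fun x => s.contains x)).elim r some) := by
  induction l generalizing r with
  | nil => simp
  | cons x xs ih =>
    simp only [List.foldl_cons, ih, List.reverse_cons, List.find?_append]
    cases hf : xs.reverse.find? (fun x => s.contains x) with
    | some y => simp
    | none =>
      simp only [Option.none_or, List.find?_singleton]
      by_cases hm : x ∈ s <;> simp [hm]

theorem range_map_getD (xs : List Int) :
    (List.range xs.length).map (fun i => xs.getD i 0) = xs := by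
  apply List.ext_getElem
  · simp
  · intro i h1 h2
    simp [List.getD, List.getElem?_eq_getElem h2]

theorem foldl_range_keepLast (s : PySem.Set Int) (xs : List Int) (init : Option Int) :
    (List.range xs.length).foldl
        (fun r i => if s.contains (xs.getD i 0) then some (xs.getD i 0) else r) init
      = xs.foldl (fun r x => if s.contains x then some x else r) init := by
  conv_rhs => rw [← range_map_getD xs]
  rw [List.foldl_map]

-- ===== VERDICT (by name: the statement is the Claim_ definition above) =====
theorem func5_spec : Claim_equal_func5 := by
  intro lst _
  unfold Spec_func5 func5 func5_alt
  show _ = lst.reverse.find?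
      (fun x => PySem.Set.contains (func5Halvings lst.length PySem.Set.empty) x)
  have hp : ∀ (r : Option Int) (x : Int),
      func5Inner x lst.length r =
        if PySem.Set.contains (func5Halvings lst.length PySem.Set.empty) x
          then some x else r := by
    intro r x
    rw [func5Inner_eq]
    by_cases hx : x ∈ halveChain lst.length
    · have hc : PySem.Set.contains (func5Halvings lst.length PySem.Set.empty) x = true := by
        rw [PySem.Set.contains_iff, mem_func5Halvings]; right; exact hx
      rw [hc]; simp [hx]
    · have hc : PySem.Set.contains (func5Halvings lst.length PySem.Set.empty) x = false := by
        rw [Bool.eq_false_iff, Ne, PySem.Set.contains_iff, mem_func5Halvings]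
        simp [hx, PySem.Set.empty]
      rw [hc]; simp [hx]
  have hfun : (fun result i => func5Inner (lst.getD i 0) lst.length result)
      = (fun r i => if PySem.Set.contains (func5Halvings lst.length PySem.Set.empty) (lst.getD i 0)
          then some (lst.getD i 0) else r) := by
    funext r i; exact hp r (lst.getD i 0)
  rw [hfun, foldl_range_keepLast, foldl_keepLast_eq_find?_reverse]
  cases lst.reverse.find?
      (fun x => PySem.Set.contains (func5Halvings lst.length PySem.Set.empty) x) <;> rfl
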